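-- pv_equiv track=rewrite | github.com/KevinSGarrett/RichPanel | scripts/prod_order_status_log_watch.py | _aggregate_terms
-- ===== SOURCE A (Python) =====
-- from typing import Any, Dict, List, Optional, Set, Tuple
--
-- def _aggregate_terms(events: List[Dict[str, Any]], terms: List[str]) -> Dict[str, int]:
--     counts = {term: 0 for term in terms}
--     for ev in events:
--         msg = str(ev.get("message") or "").lower()
--         for term in terms:
--             if term in msg:
--                 counts[term] += 1
--     return counts
-- ===== SOURCE B (Python) =====
-- from typing import Any, Dict, List
--
-- def _aggregate_terms(events: List[Dict[str, Any]], terms: List[str]) -> Dict[str, int]: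
--     msgs = [str(ev.get("message") or "").lower() for ev in events]
--     mult: Dict[str, int] = {}
--     for t in terms:
--         mult[t] = mult.get(t, 0) + 1
--     return {t: m * sum(1 for msg in msgs if t in msg) for t, m in mult.items()}
-- ===== Notes on version B (the rewrite author's own statement) =====
-- stated objective: faster
-- what changed: Term-major instead of event-major: B lowercases every message once into a list, tallies term multiplicities into a counter dict, then scans the message list once per DISTINCT term and multiplies by the multiplicity, where A re-runs the substring test for every occurrence of every term against every event.
import Mathlib
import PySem

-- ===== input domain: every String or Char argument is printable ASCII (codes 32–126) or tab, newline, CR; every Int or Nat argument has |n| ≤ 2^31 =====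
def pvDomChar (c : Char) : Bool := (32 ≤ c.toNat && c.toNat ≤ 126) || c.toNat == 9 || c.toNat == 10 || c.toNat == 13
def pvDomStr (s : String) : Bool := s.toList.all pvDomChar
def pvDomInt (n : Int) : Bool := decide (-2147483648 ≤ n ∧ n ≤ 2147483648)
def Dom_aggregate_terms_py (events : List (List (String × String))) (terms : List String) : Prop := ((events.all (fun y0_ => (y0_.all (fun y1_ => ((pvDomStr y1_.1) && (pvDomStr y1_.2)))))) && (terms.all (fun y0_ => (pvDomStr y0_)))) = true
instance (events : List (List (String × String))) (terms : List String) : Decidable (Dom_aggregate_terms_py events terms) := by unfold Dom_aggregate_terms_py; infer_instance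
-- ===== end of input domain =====

-- B re-implements the count term-major: messages lowercased once, term multiplicities tallied
-- once, one scan of the messages per DISTINCT term (measured faster in a timing run);
-- the theorems below prove the return values identical on all inputs.

-- ===== PORT A =====
def aggregate_terms_py (events : List (List (String × String))) (terms : List String) : List (String × Int) :=
  let counts : PySem.Dict String Int := terms.foldl (fun d term => d.insert term 0) PySem.Dict.empty
  let counts := events.foldl (fun d ev =>
      let msg := PySem.Str.lower (((PySem.Dict.mk ev).get? "message").getD "")
      terms.foldl (fun d term => if PySem.Str.isIn term msg then d.modify term 0 (· + 1) else d) d)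
    counts
  counts.items

-- ===== PORT B =====
def aggregate_terms_py_alt (events : List (List (String × String))) (terms : List String) : List (String × Int) :=
  let msgs := events.map (fun ev => PySem.Str.lower (((PySem.Dict.mk ev).get? "message").getD ""))
  let mult : PySem.Dict String Int := terms.foldl (fun d t => d.insert t (d.getD t 0 + 1)) PySem.Dict.empty
  mult.items.map (fun p =>
    (p.1, p.2 * msgs.foldl (fun acc msg => if PySem.Str.isIn p.1 msg then acc + 1 else acc) 0))

-- ===== PRECONDITION & SPEC =====
def Spec_aggregate_terms_py (events : List (List (String × String))) (terms : List String) (out : List (String × Int)) : Prop := out = aggregate_terms_py_alt events terms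
instance (events : List (List (String × String))) (terms : List String) (out : List (String × Int)) : Decidable (Spec_aggregate_terms_py events terms out) := by unfold Spec_aggregate_terms_py; infer_instance

-- ===== CLAIM (what is proved, stated in full; the proofs are below) =====
def Claim_equal_aggregate_terms_py : Prop := ∀ (events : List (List (String × String))) (terms : List String), Dom_aggregate_terms_py events terms → Spec_aggregate_terms_py events terms (aggregate_terms_py events terms)

-- ===== LEMMAS AND PROOFS =====

/-- A dict whose items are `keys.map (fun t => (t, f t))` contains exactly the keys. -/
lemma pv_contains {d : PySem.Dict String Int} {keys : List String} {f : String → Int}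
    (h : d.items = keys.map (fun t => (t, f t))) (t0 : String) :
    d.contains t0 = true ↔ t0 ∈ keys := by
  simp [PySem.Dict.contains, h, List.any_map, List.any_eq_true, Function.comp]

lemma pv_keys {d : PySem.Dict String Int} {keys : List String} {f : String → Int}
    (h : d.items = keys.map (fun t => (t, f t))) : d.keys = keys := by
  simp [PySem.Dict.keys, h, List.map_map, Function.comp_def]

lemma pv_getD {d : PySem.Dict String Int} {keys : List String} {f : String → Int}
    (h : d.items = keys.map (fun t => (t, f t))) (hnd : keys.Nodup)
    {t0 : String} (ht : t0 ∈ keys) : d.getD t0 0 = f t0 := by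
  apply PySem.Dict.getD_of_mem_items
  · rw [h]; exact List.mem_map_of_mem ht
  · rw [pv_keys h]; exact hnd

lemma pv_insert_rep {d : PySem.Dict String Int} {keys : List String} {f : String → Int}
    (h : d.items = keys.map (fun t => (t, f t))) {t0 : String} (ht : t0 ∈ keys) (v : Int) :
    (d.insert t0 v).items = keys.map (fun t => (t, if t = t0 then v else f t)) := by
  rw [PySem.Dict.items_insert_of_contains d v ((pv_contains h t0).2 ht), h, List.map_map]
  refine List.map_congr_left (fun t _ => ?_)
  by_cases ht0 : t = t0 <;> simp [Function.comp, ht0]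

/-- The initial `{term: 0 for term in terms}` dict, as a fold starting from any represented dict. -/
lemma pv_init : ∀ (ts : List String) (s : List String) (d : PySem.Dict String Int),
    d.items = s.map (fun t => (t, (0 : Int))) →
    (ts.foldl (fun d term => d.insert term 0) d).items
      = (ts.foldl PySem.Set.add s).map (fun t => (t, (0 : Int)))
  | [], s, d, h => by simpa using h
  | t0 :: ts, s, d, h => by
    simp only [List.foldl_cons]
    by_cases hmem : t0 ∈ s
    · have hc : d.contains t0 = true := (pv_contains h t0).2 hmem
      have hitems : (d.insert t0 0).items = s.map (fun t => (t, (0 : Int))) := by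
        rw [PySem.Dict.items_insert_of_contains d 0 hc, h, List.map_map]
        refine List.map_congr_left (fun t _ => ?_)
        by_cases ht0 : t = t0 <;> simp [Function.comp, ht0]
      rw [pv_init ts s _ hitems]
      have hadd : PySem.Set.add s t0 = s := by
        simp [PySem.Set.add, PySem.Set.contains, hmem]
      rw [hadd]
    · have hc : d.contains t0 = false := by
        rcases hcb : d.contains t0 with _ | _
        · rfl
        · exact absurd ((pv_contains h t0).1 hcb) hmem
      have hitems : (d.insert t0 0).items = (s ++ [t0]).map (fun t => (t, (0 : Int))) := by
        rw [PySem.Dict.items_insert_of_not_contains d 0 hc, h]; simp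
      rw [pv_init ts (s ++ [t0]) _ hitems]
      have hadd : PySem.Set.add s t0 = s ++ [t0] := by
        simp [PySem.Set.add, PySem.Set.contains, hmem]
      rw [hadd]

/-- One event of A's outer loop: every matched occurrence of a term adds 1. -/
lemma pv_inner (m : String) (keys : List String) (hnd : keys.Nodup) :
    ∀ (ts : List String) (f : String → Int) (d : PySem.Dict String Int),
    (∀ t ∈ ts, t ∈ keys) →
    d.items = keys.map (fun t => (t, f t)) →
    (ts.foldl (fun d term => if PySem.Str.isIn term m then d.modify term 0 (· + 1) else d) d).items
      = keys.map (fun t => (t, f t + if PySem.Str.isIn t m then (ts.count t : Int) else 0))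
  | [], f, d, _, h => by
    rw [List.foldl_nil, h]
    refine List.map_congr_left (fun t _ => ?_)
    simp
  | t0 :: ts, f, d, hsub, h => by
    simp only [List.foldl_cons]
    rcases hm : PySem.Str.isIn t0 m with _ | _
    · rw [if_neg (by simp)]
      rw [pv_inner m keys hnd ts f d (fun t ht => hsub t (List.mem_cons_of_mem _ ht)) h]
      refine List.map_congr_left (fun t _ => ?_)
      by_cases htm : PySem.Str.isIn t m = true
      · have hne : t ≠ t0 := fun he => by rw [he, hm] at htm; exact Bool.noConfusion htm
        rw [if_pos htm, if_pos htm, List.count_cons, if_neg (by simp [Ne.symm hne])]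
        simp
      · rw [if_neg htm, if_neg htm]
    · have ht0 : t0 ∈ keys := hsub t0 List.mem_cons_self
      rw [if_pos rfl]
      have hmod : (d.modify t0 0 (· + 1)).items
          = keys.map (fun t => (t, if t = t0 then f t0 + 1 else f t)) := by
        show (d.insert t0 (d.getD t0 0 + 1)).items = _
        rw [pv_getD h hnd ht0, pv_insert_rep h ht0 (f t0 + 1)]
      rw [pv_inner m keys hnd ts (fun t => if t = t0 then f t0 + 1 else f t) _
            (fun t ht => hsub t (List.mem_cons_of_mem _ ht)) hmod]
      refine List.map_congr_left (fun t _ => ?_)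
      by_cases hte : t = t0
      · subst hte
        rw [if_pos rfl, if_pos hm, if_pos hm, List.count_cons, if_pos (by simp)]
        push_cast
        ring_nf
      · rw [if_neg hte]
        by_cases htm : PySem.Str.isIn t m = true
        · rw [if_pos htm, if_pos htm, List.count_cons, if_neg (by simp [Ne.symm hte])]
          simp
        · rw [if_neg htm, if_neg htm]

/-- A's whole event loop: each term's count is its multiplicity times the number of matching events. -/
lemma pv_outer (terms keys : List String) (hnd : keys.Nodup)
    (hsub : ∀ t ∈ terms, t ∈ keys) :
    ∀ (evs : List (List (String × String))) (f : String → Int) (d : PySem.Dict String Int),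
    d.items = keys.map (fun t => (t, f t)) →
    (evs.foldl (fun d ev =>
        terms.foldl (fun d term =>
          if PySem.Str.isIn term (PySem.Str.lower (((PySem.Dict.mk ev).get? "message").getD "")) then
            d.modify term 0 (· + 1)
          else d) d)
      d).items
      = keys.map (fun t =>
          (t, f t + (terms.count t : Int) *
            (evs.countP (fun ev =>
              PySem.Str.isIn t (PySem.Str.lower (((PySem.Dict.mk ev).get? "message").getD ""))) : Int)))
  | [], f, d, h => by
    rw [List.foldl_nil, h]
    refine List.map_congr_left (fun t _ => ?_)
    simp
  | ev :: evs, f, d, h => by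
    simp only [List.foldl_cons]
    rw [pv_outer terms keys hnd hsub evs
          (fun t => f t + if PySem.Str.isIn t (PySem.Str.lower (((PySem.Dict.mk ev).get? "message").getD "")) then (terms.count t : Int) else 0) _
          (pv_inner (PySem.Str.lower (((PySem.Dict.mk ev).get? "message").getD "")) keys hnd terms f d hsub h)]
    refine List.map_congr_left (fun t _ => ?_)
    simp only [List.countP_cons]
    by_cases htm : PySem.Str.isIn t (PySem.Str.lower (((PySem.Dict.mk ev).get? "message").getD "")) = true
    · rw [if_pos htm, if_pos htm]
      push_cast
      ring_nf
    · rw [if_neg htm, if_neg htm]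
      push_cast
      ring_nf

-- ===== VERDICT (by name: the statement is the Claim_ definition above) =====
theorem aggregate_terms_py_spec : Claim_equal_aggregate_terms_py := by
  intro events terms _
  show aggregate_terms_py events terms = aggregate_terms_py_alt events terms
  unfold aggregate_terms_py aggregate_terms_py_alt
  dsimp only
  have hinit := pv_init terms [] PySem.Dict.empty (by simp [PySem.Dict.empty])
  rw [← PySem.Set.ofList_eq_foldl] at hinit
  rw [pv_outer terms (PySem.Set.ofList terms) (PySem.Set.nodup_ofList terms)
        (fun t ht => (PySem.Set.mem_ofList terms t).2 ht) events (fun _ => 0) _ hinit]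
  rw [PySem.Dict.foldl_insert_getD_add_one_eq_counter, PySem.Dict.items_counter, List.map_map]
  refine List.map_congr_left (fun t _ => ?_)
  rw [Function.comp_apply]
  rw [PySem.List.foldl_count_if
        (fun msg => PySem.Str.isIn t msg) (events.map (fun ev => PySem.Str.lower (((PySem.Dict.mk ev).get? "message").getD ""))) 0]
  rw [List.countP_map]
  simp only [Function.comp_def, zero_add]
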